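-- pv_equiv track=rewrite | github.com/sara-bouchenak/TITANIA | src/TITANIA/result_statistics/create_dataset.py | compute_metrics_name_dict
-- ===== SOURCE A (Python) =====
-- def compute_metrics_name_dict(columns, sensitive_attributes):
--
--     other_columns = {}
--     other_columns["info"] = []
--     if "round" in columns:
--         other_columns["info"].append("round")
--     if "id_client" in columns:
--         other_columns["info"].append("id_client")
--
--     bias_metrics_dict = {sens_attr: [column for column in columns if sens_attr in column] for sens_attr in sensitive_attributes}
--     bias_metrics_list = [bias_metric for sublist in bias_metrics_dict.values() for bias_metric in sublist]
--     all_utility_metrics = ['accuracy', 'precision', 'recall', 'f1', 'loss', "training_loss"]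
--     utility_metrics_list = [column for column in columns if column in all_utility_metrics]
--
--     other_columns["method_pars"] = []
--     for column in columns:
--         if column not in utility_metrics_list + bias_metrics_list + other_columns["info"]:
--             other_columns["method_pars"].append(column)
--
--     metrics_by_cat = bias_metrics_dict
--     metrics_by_cat["utility"] = utility_metrics_list
--     delete_key = [key for key, val in metrics_by_cat.items() if val == []]
--     for key in delete_key:
--         del metrics_by_cat[key]
--
--     return metrics_by_cat, other_columns
-- ===== SOURCE B (Python) =====
-- def compute_metrics_name_dict(columns, sensitive_attributes):
--     utility_names = {'accuracy', 'precision', 'recall', 'f1', 'loss', 'training_loss'}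
--     buckets = {s: [] for s in sensitive_attributes}
--     utility = []
--     method_pars = []
--     for column in columns:
--         matched = False
--         for s in buckets:
--             if s in column:
--                 buckets[s].append(column)
--                 matched = True
--         is_util = column in utility_names
--         if is_util:
--             utility.append(column)
--         if not matched and not is_util and column not in ('round', 'id_client'):
--             method_pars.append(column)
--     info = []
--     if 'round' in columns:
--         info.append('round')
--     if 'id_client' in columns:
--         info.append('id_client')
--     buckets['utility'] = utility
--     metrics_by_cat = {k: v for k, v in buckets.items() if v != []}
--     return metrics_by_cat, {'info': info, 'method_pars': method_pars}
-- ===== Notes on version B (the rewrite author's own statement) =====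
-- stated objective: alternative
-- what changed: Replaces A's three separate scans of columns (bias dict comprehension, utility comprehension, method_pars loop testing membership in a concatenated list) by a single classification pass over columns that maintains per-attribute buckets, the utility list and method_pars simultaneously, and replaces the build-then-delete-empty-keys step by filtering the items once.
import Mathlib
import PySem

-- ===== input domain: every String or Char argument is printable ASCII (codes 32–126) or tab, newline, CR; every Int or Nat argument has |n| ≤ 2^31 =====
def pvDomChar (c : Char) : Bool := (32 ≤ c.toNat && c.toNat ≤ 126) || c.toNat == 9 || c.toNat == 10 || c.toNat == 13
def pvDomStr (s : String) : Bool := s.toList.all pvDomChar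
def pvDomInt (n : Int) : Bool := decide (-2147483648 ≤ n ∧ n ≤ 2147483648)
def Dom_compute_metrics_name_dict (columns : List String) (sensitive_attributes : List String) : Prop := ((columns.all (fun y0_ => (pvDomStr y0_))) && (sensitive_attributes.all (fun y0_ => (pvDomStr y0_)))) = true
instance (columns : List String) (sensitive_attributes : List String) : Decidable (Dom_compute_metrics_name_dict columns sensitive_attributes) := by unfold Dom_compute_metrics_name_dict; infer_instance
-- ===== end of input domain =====

-- B replaces A's three separate scans of `columns` by one classification pass that fills the
-- bias buckets, the utility list and method_pars simultaneously (objective: alternative, same cost class).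

-- ===== PORT A =====
def pvAllUtility : List String := ["accuracy", "precision", "recall", "f1", "loss", "training_loss"]

def compute_metrics_name_dict (columns : List String) (sensitive_attributes : List String) :
    (List (String × List String)) × (List (String × List String)) :=
  let info0 : List String := []
  let info1 : List String := if columns.contains "round" then info0 ++ ["round"] else info0
  let info : List String := if columns.contains "id_client" then info1 ++ ["id_client"] else info1
  let bias_metrics_dict : PySem.Dict String (List String) :=
    sensitive_attributes.foldl
      (fun d s => d.insert s (columns.filter (fun c => PySem.Str.isIn s c))) PySem.Dict.empty
  let bias_metrics_list : List String :=
    bias_metrics_dict.values.foldl (fun acc sub => acc ++ sub) []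
  let utility_metrics_list : List String := columns.filter (fun c => pvAllUtility.contains c)
  let method_pars : List String :=
    columns.foldl (fun acc c =>
      if !((utility_metrics_list ++ bias_metrics_list ++ info).contains c) then acc ++ [c] else acc) []
  let metrics_by_cat : PySem.Dict String (List String) :=
    bias_metrics_dict.insert "utility" utility_metrics_list
  let delete_key : List String :=
    (metrics_by_cat.items.filter (fun p => p.2 == ([] : List String))).map (·.1)
  let final : PySem.Dict String (List String) :=
    delete_key.foldl (fun d k => d.erase k) metrics_by_cat
  (final.items, [("info", info), ("method_pars", method_pars)])

-- ===== PORT B =====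
def pvUtilityNames : PySem.Set String := PySem.Set.ofList pvAllUtility

-- one column's classification step; `buckets[s].append(column)` is exact as an
-- overwrite-in-place insert of the extended value (s is always a present key)
def pvAltStep (c : String)
    (st : PySem.Dict String (List String) × List String × List String) :
    PySem.Dict String (List String) × List String × List String :=
  let bm := st.1.keys.foldl
      (fun (p : PySem.Dict String (List String) × Bool) s =>
        if PySem.Str.isIn s c then (p.1.insert s (p.1.getD s [] ++ [c]), true) else p)
      (st.1, false)
  let is_util : Bool := PySem.Set.contains pvUtilityNames c
  let utility := if is_util then st.2.1 ++ [c] else st.2.1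
  let method_pars :=
    if !bm.2 && !is_util && !(c == "round") && !(c == "id_client")
    then st.2.2 ++ [c] else st.2.2
  (bm.1, utility, method_pars)

def compute_metrics_name_dict_alt (columns : List String) (sensitive_attributes : List String) :
    (List (String × List String)) × (List (String × List String)) :=
  let buckets0 : PySem.Dict String (List String) :=
    sensitive_attributes.foldl (fun d s => d.insert s []) PySem.Dict.empty
  let st := columns.foldl (fun st c => pvAltStep c st) (buckets0, [], [])
  let info0 : List String := []
  let info1 : List String := if columns.contains "round" then info0 ++ ["round"] else info0
  let info : List String := if columns.contains "id_client" then info1 ++ ["id_client"] else info1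
  let buckets : PySem.Dict String (List String) := st.1.insert "utility" st.2.1
  let metrics_by_cat : List (String × List String) :=
    buckets.items.filter (fun p => !(p.2 == ([] : List String)))
  (metrics_by_cat, [("info", info), ("method_pars", st.2.2)])

-- ===== PRECONDITION & SPEC =====
def Spec_compute_metrics_name_dict (columns : List String) (sensitive_attributes : List String) (out : (List (String × List String)) × (List (String × List String))) : Prop := out = compute_metrics_name_dict_alt columns sensitive_attributes
instance (columns : List String) (sensitive_attributes : List String) (out : (List (String × List String)) × (List (String × List String))) : Decidable (Spec_compute_metrics_name_dict columns sensitive_attributes out) := by unfold Spec_compute_metrics_name_dict; infer_instance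

-- ===== CLAIM (what is proved, stated in full; the proofs are below) =====
def Claim_equal_compute_metrics_name_dict : Prop := ∀ (columns : List String) (sensitive_attributes : List String), Dom_compute_metrics_name_dict columns sensitive_attributes → Spec_compute_metrics_name_dict columns sensitive_attributes (compute_metrics_name_dict columns sensitive_attributes)

-- ===== LEMMAS AND PROOFS =====

def pvMkMap (D : List String) (g : String → List String) : PySem.Dict String (List String) :=
  PySem.Dict.mk (D.map (fun t => (t, g t)))
theorem pv_keys_mkMap (D : List String) (g : String → List String) :
    (pvMkMap D g).keys = D := by
  simp [pvMkMap, PySem.Dict.keys, List.map_map, Function.comp_def]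
theorem pv_contains_mkMap (D : List String) (g : String → List String) (s : String) :
    (pvMkMap D g).contains s = decide (s ∈ D) := by
  rw [PySem.Dict.contains_eq_decide_mem_keys, pv_keys_mkMap]

theorem pv_insert_mkMap_self (D : List String) (g : String → List String) (s : String) :
    (pvMkMap D g).insert s (g s) = pvMkMap (PySem.Set.add D s) g := by
  by_cases hs : s ∈ D
  · apply PySem.Dict.ext
    rw [PySem.Dict.items_insert_of_contains _ _ (by simp [pv_contains_mkMap, hs])]
    have : PySem.Set.add D s = D := by simp [PySem.Set.add, PySem.Set.contains_eq_listContains, hs]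
    rw [this]
    simp only [pvMkMap, List.map_map]
    apply List.map_congr_left
    intro t _
    by_cases h : t = s <;> simp [h, Function.comp]
  · apply PySem.Dict.ext
    rw [PySem.Dict.items_insert_of_not_contains _ _ (by simp [pv_contains_mkMap, hs])]
    have : PySem.Set.add D s = D ++ [s] := by simp [PySem.Set.add, PySem.Set.contains_eq_listContains, hs]
    rw [this]
    simp [pvMkMap]

theorem pv_insert_mkMap_mem (D : List String) (g : String → List String) (s : String)
    (v : List String) (hs : s ∈ D) :
    (pvMkMap D g).insert s v = pvMkMap D (fun t => if t = s then v else g t) := by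
  apply PySem.Dict.ext
  rw [PySem.Dict.items_insert_of_contains _ _ (by simp [pv_contains_mkMap, hs])]
  simp only [pvMkMap, List.map_map]
  apply List.map_congr_left
  intro t _
  by_cases h : t = s <;> simp [h, Function.comp]

theorem pv_foldl_insert_mkMap (S : List String) (D : List String) (g : String → List String) :
    S.foldl (fun d t => d.insert t (g t)) (pvMkMap D g) = pvMkMap (PySem.Set.update D S) g := by
  induction S generalizing D with
  | nil => rfl
  | cons s S ih => simp only [List.foldl_cons, pv_insert_mkMap_self]; exact ih _

theorem pv_getD_mkMap (D : List String) (g : String → List String) (s : String)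
    (hD : D.Nodup) (hs : s ∈ D) : (pvMkMap D g).getD s [] = g s := by
  apply PySem.Dict.getD_of_mem_items
  · exact List.mem_map_of_mem hs
  · rw [pv_keys_mkMap]; exact hD

theorem pv_inner (c : String) (K : List String) : ∀ (D : List String) (g : String → List String)
    (b : Bool), D.Nodup → K.Nodup → (∀ s ∈ K, s ∈ D) →
    K.foldl (fun (p : PySem.Dict String (List String) × Bool) s =>
        if PySem.Str.isIn s c then (p.1.insert s (p.1.getD s [] ++ [c]), true) else p)
      (pvMkMap D g, b)
    = (pvMkMap D (fun t => if t ∈ K ∧ PySem.Str.isIn t c = true then g t ++ [c] else g t),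
       b || K.any (fun s => PySem.Str.isIn s c)) := by
  induction K with
  | nil =>
    intro D g b hD _ _
    simp only [List.foldl_nil, List.any_nil, Bool.or_false, Prod.mk.injEq]
    exact ⟨by simp [pvMkMap], trivial⟩
  | cons s K ih =>
    intro D g b hD hK hsub
    have hsD : s ∈ D := hsub s (List.mem_cons_self ..)
    have hsK : s ∉ K := (List.nodup_cons.mp hK).1
    simp only [List.foldl_cons]
    by_cases hin : PySem.Chars.isIn s.toList c.toList = true
    · rw [if_pos (by simpa using hin)]
      rw [pv_getD_mkMap D g s hD hsD, pv_insert_mkMap_mem D g s _ hsD]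
      rw [ih D _ true hD (List.nodup_cons.mp hK).2 (fun t ht => hsub t (List.mem_cons_of_mem _ ht))]
      rw [Prod.mk.injEq]
      refine ⟨?_, by simp [hin]⟩
      unfold pvMkMap
      apply congrArg
      apply List.map_congr_left
      intro t _
      by_cases h : t = s
      · subst h
        simp [hsK, hin]
      · simp [h]
    · rw [if_neg (by simpa using hin)]
      rw [ih D g b hD (List.nodup_cons.mp hK).2 (fun t ht => hsub t (List.mem_cons_of_mem _ ht))]
      rw [Prod.mk.injEq]
      refine ⟨?_, by simp [hin]⟩
      unfold pvMkMap
      apply congrArg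
      apply List.map_congr_left
      intro t _
      by_cases h : t = s
      · subst h
        simp [hin]
      · simp [h]

theorem pv_if_append_filter {α : Type} (q : α → Bool) (c : α) (m : List α) (X : List α) :
    (if q c = true then m ++ [c] else m) ++ X.filter q = m ++ (c :: X).filter q := by
  by_cases h : q c <;> simp [h]

theorem pv_outer (X : List String) : ∀ (D : List String) (g : String → List String)
    (u m : List String), D.Nodup →
    X.foldl (fun st c => pvAltStep c st) (pvMkMap D g, u, m)
    = (pvMkMap D (fun t => g t ++ X.filter (fun c => PySem.Str.isIn t c)),
       u ++ X.filter (fun c => PySem.Set.contains pvUtilityNames c),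
       m ++ X.filter (fun c => !(D.any (fun s => PySem.Str.isIn s c))
             && !(PySem.Set.contains pvUtilityNames c) && !(c == "round") && !(c == "id_client"))) := by
  induction X with
  | nil =>
    intro D g u m hD
    simp [pvMkMap]
  | cons c X ih =>
    intro D g u m hD
    simp only [List.foldl_cons]
    have hstep : pvAltStep c (pvMkMap D g, u, m)
        = (pvMkMap D (fun t => if t ∈ D ∧ PySem.Str.isIn t c = true then g t ++ [c] else g t),
           (if PySem.Set.contains pvUtilityNames c then u ++ [c] else u),
           (if !(D.any (fun s => PySem.Str.isIn s c)) && !(PySem.Set.contains pvUtilityNames c)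
                 && !(c == "round") && !(c == "id_client") then m ++ [c] else m)) := by
      unfold pvAltStep
      rw [pv_keys_mkMap]
      rw [pv_inner c D D g false hD hD (fun _ h => h)]
      simp
    rw [hstep, ih D _ _ _ hD]
    rw [Prod.mk.injEq, Prod.mk.injEq]
    refine ⟨?_, ?_, ?_⟩
    · unfold pvMkMap
      apply congrArg
      apply List.map_congr_left
      intro t ht
      by_cases h : PySem.Chars.isIn t.toList c.toList = true
      · simp [ht, h]
      · simp [ht, h]
    · exact pv_if_append_filter _ c u X
    · exact pv_if_append_filter (fun c => !(D.any (fun s => PySem.Str.isIn s c))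
        && !(PySem.Set.contains pvUtilityNames c) && !(c == "round") && !(c == "id_client")) c m X

theorem pv_foldl_erase (ks : List String) : ∀ (d : PySem.Dict String (List String)),
    (ks.foldl (fun d k => d.erase k) d).items
      = d.items.filter (fun p => !(ks.contains p.1)) := by
  induction ks with
  | nil => intro d; simp
  | cons k ks ih =>
    intro d
    rw [List.foldl_cons, ih (d.erase k)]
    have he : (d.erase k).items = d.items.filter (fun p => !(p.1 == k)) := rfl
    rw [he, List.filter_filter]
    apply List.filter_congr
    intro p _
    by_cases h : p.1 = k <;> simp [h]

theorem pv_nodup_fst_eq {L : List (String × List String)} (h : (L.map (·.1)).Nodup)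
    {p q : String × List String} (hp : p ∈ L) (hq : q ∈ L) (hfst : p.1 = q.1) : p = q := by
  have := List.inj_on_of_nodup_map h
  exact this hp hq hfst

theorem pv_filter_delete (L : List (String × List String)) (h : (L.map (·.1)).Nodup) :
    L.filter (fun p => !(((L.filter (fun q => q.2 == ([] : List String))).map (·.1)).contains p.1))
      = L.filter (fun p => !(p.2 == ([] : List String))) := by
  apply List.filter_congr
  intro p hp
  congr 1
  rw [Bool.eq_iff_iff]
  simp only [List.contains_iff_mem, List.mem_map, List.mem_filter, beq_iff_eq]
  constructor
  · rintro ⟨q, ⟨hqL, hq2⟩, hq1⟩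
    rw [pv_nodup_fst_eq h hp hqL hq1.symm]
    exact hq2
  · intro h2
    exact ⟨p, ⟨hp, h2⟩, rfl⟩

theorem pv_names : pvUtilityNames = pvAllUtility := by decide

theorem pv_main (X S : List String) :
    compute_metrics_name_dict X S = compute_metrics_name_dict_alt X S := by
  simp only [compute_metrics_name_dict, compute_metrics_name_dict_alt]
  have hD : (PySem.Set.ofList S).Nodup := PySem.Set.nodup_ofList S
  set D := PySem.Set.ofList S with hDdef
  set gA : String → List String := fun t => X.filter (fun c => PySem.Str.isIn t c) with hgA
  -- A's dict comprehension
  have hupd : PySem.Set.update ([] : PySem.Set String) S = D := by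
    rw [hDdef, PySem.Set.ofList_eq_foldl]; rfl
  have hAfold : S.foldl (fun d s => d.insert s (X.filter (fun c => PySem.Str.isIn s c))) PySem.Dict.empty
      = pvMkMap D gA := by
    rw [show (PySem.Dict.empty : PySem.Dict String (List String)) = pvMkMap [] gA from rfl,
       pv_foldl_insert_mkMap S [] gA, hupd]
  -- B's initial buckets
  have hBfold0 : S.foldl (fun d s => d.insert s []) PySem.Dict.empty
      = pvMkMap D (fun _ => []) := by
    rw [show (PySem.Dict.empty : PySem.Dict String (List String)) = pvMkMap [] (fun _ => []) from rfl,
       pv_foldl_insert_mkMap S [] (fun _ => []), hupd]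
  rw [hAfold, hBfold0, pv_outer X D (fun _ => []) [] [] hD]
  have huf : (fun c => PySem.Set.contains pvUtilityNames c) = (fun c => pvAllUtility.contains c) := by
    funext c
    rw [PySem.Set.contains_eq_listContains, pv_names]
  simp only [List.nil_append, huf]
  rw [Prod.mk.injEq]
  refine ⟨?_, ?_⟩
  · rw [pv_foldl_erase]
    apply pv_filter_delete
    show ((pvMkMap D gA).insert "utility" (List.filter (fun c => pvAllUtility.contains c) X)).keys.Nodup
    apply PySem.Dict.nodup_keys_insert
    rw [pv_keys_mkMap]
    exact hD
  · simp only [List.cons.injEq, Prod.mk.injEq, true_and, and_true]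
    have hmp : ∀ (p : String → Bool), X.foldl (fun acc c => if p c = true then acc ++ [c] else acc) [] = X.filter p := by
      intro p
      have h0 := PySem.List.foldl_append_if p (fun c => c) X []
      simpa using h0
    rw [hmp]
    apply List.filter_congr
    intro c hc
    have hvals : (pvMkMap D gA).values = D.map gA := by
      simp [pvMkMap, PySem.Dict.values, List.map_map, Function.comp_def]
    have hbias : List.foldl (fun acc sub => acc ++ sub) [] (pvMkMap D gA).values
        = List.flatMap (fun (sub : List String) => sub) (D.map gA) := by
      have h1 := PySem.List.foldl_append_eq_flatMap (fun (sub : List String) => sub) ((pvMkMap D gA).values) []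
      simpa [hvals] using h1
    rw [hbias, Bool.eq_iff_iff]
    by_cases hr : "round" ∈ X <;> by_cases hi : "id_client" ∈ X
    · simp [hr, hi, hc, hgA, List.mem_filter]
      tauto
    · have hcid : c ≠ "id_client" := fun h => hi (h ▸ hc)
      simp [hr, hi, hc, hcid, hgA, List.mem_filter]
      tauto
    · have hcr : c ≠ "round" := fun h => hr (h ▸ hc)
      simp [hr, hi, hc, hcr, hgA, List.mem_filter]
      tauto
    · have hcid : c ≠ "id_client" := fun h => hi (h ▸ hc)
      have hcr : c ≠ "round" := fun h => hr (h ▸ hc)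
      simp [hr, hi, hc, hcr, hcid, hgA, List.mem_filter]
      tauto

-- ===== VERDICT (by name: the statement is the Claim_ definition above) =====
theorem compute_metrics_name_dict_spec : Claim_equal_compute_metrics_name_dict := by
  intro columns sensitive_attributes _
  unfold Spec_compute_metrics_name_dict
  exact pv_main columns sensitive_attributes
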